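-- pv_equiv track=rewrite | github.com/dandi0220/data-science-portfolio | ethereum/code/partd_gas_1.py | reducer_join
-- ===== SOURCE A (Python) =====
-- def reducer_join(key, join_values):
--     tran_count = 0
--     tran_value = 0
--     gas = 0
--     smart = False
--     for join_value in join_values:
--
--         if join_value[1]==1: #transaction data
--             tran_value += join_value[0][0]
--             gas += join_value[0][1]
--             tran_count += join_value[0][2]
--
--         if join_value[1]==2: #contracts data
--             smart = True
--     if tran_value>0 and smart:
--         yield(key,(tran_value, gas, tran_count))
-- ===== SOURCE B (Python) =====
-- def reducer_join(key, join_values):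
--     rows = list(join_values)
--     smart = any(jv[1] == 2 for jv in rows)
--     tran_value = sum(jv[0][0] for jv in rows if jv[1] == 1)
--     gas = sum(jv[0][1] for jv in rows if jv[1] == 1)
--     tran_count = sum(jv[0][2] for jv in rows if jv[1] == 1)
--     if tran_value > 0 and smart:
--         yield (key, (tran_value, gas, tran_count))
-- ===== Notes on version B (the rewrite author's own statement) =====
-- stated objective: simpler
-- what changed: Replaces the single fused accumulator loop with four independent declarative passes: an any() for the smart flag and three sum() comprehensions over transaction rows, then the same guard.
import Mathlib
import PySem

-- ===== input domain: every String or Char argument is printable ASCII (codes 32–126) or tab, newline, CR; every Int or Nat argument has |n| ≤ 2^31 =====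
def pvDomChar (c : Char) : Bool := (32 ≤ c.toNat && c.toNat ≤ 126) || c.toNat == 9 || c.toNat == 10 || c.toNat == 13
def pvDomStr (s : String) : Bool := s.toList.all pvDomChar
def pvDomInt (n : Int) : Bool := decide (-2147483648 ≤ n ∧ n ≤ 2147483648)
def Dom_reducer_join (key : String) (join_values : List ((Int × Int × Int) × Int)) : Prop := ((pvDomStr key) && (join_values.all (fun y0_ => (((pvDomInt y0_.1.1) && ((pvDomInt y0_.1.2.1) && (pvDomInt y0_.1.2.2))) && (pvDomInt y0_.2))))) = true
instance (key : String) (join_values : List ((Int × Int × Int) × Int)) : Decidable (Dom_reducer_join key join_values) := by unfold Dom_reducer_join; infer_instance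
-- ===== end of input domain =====

-- B replaces A's fused accumulator loop with an any() pass plus three independent sum-comprehensions (objective: simpler); return value only (both are generators, materialized as a list).
-- ===== PORT A =====
-- state = (tran_count, tran_value, gas, smart), exactly A's loop body
def stepA (s : Int × Int × Int × Bool) (jv : (Int × Int × Int) × Int) : Int × Int × Int × Bool :=
  let s := if jv.2 == 1 then (s.1 + jv.1.2.2, s.2.1 + jv.1.1, s.2.2.1 + jv.1.2.1, s.2.2.2) else s
  if jv.2 == 2 then (s.1, s.2.1, s.2.2.1, true) else s

def reducer_join (key : String) (join_values : List ((Int × Int × Int) × Int)) : List (String × (Int × Int × Int)) :=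
  let st := join_values.foldl stepA (0, 0, 0, false)
  if st.2.1 > 0 && st.2.2.2 then [(key, (st.2.1, st.2.2.1, st.1))] else []

-- ===== PORT B =====
def reducer_join_alt (key : String) (join_values : List ((Int × Int × Int) × Int)) : List (String × (Int × Int × Int)) :=
  let rows := join_values
  let smart := rows.any (fun jv => jv.2 == 2)
  let tran_value := ((rows.filter (fun jv => jv.2 == 1)).map (fun jv => jv.1.1)).sum
  let gas := ((rows.filter (fun jv => jv.2 == 1)).map (fun jv => jv.1.2.1)).sum
  let tran_count := ((rows.filter (fun jv => jv.2 == 1)).map (fun jv => jv.1.2.2)).sum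
  if tran_value > 0 && smart then [(key, (tran_value, gas, tran_count))] else []

-- ===== PRECONDITION & SPEC =====
def Spec_reducer_join (key : String) (join_values : List ((Int × Int × Int) × Int)) (out : List (String × (Int × Int × Int))) : Prop := out = reducer_join_alt key join_values
instance (key : String) (join_values : List ((Int × Int × Int) × Int)) (out : List (String × (Int × Int × Int))) : Decidable (Spec_reducer_join key join_values out) := by unfold Spec_reducer_join; infer_instance

-- ===== CLAIM (what is proved, stated in full; the proofs are below) =====
def Claim_equal_reducer_join : Prop := ∀ (key : String) (join_values : List ((Int × Int × Int) × Int)), Dom_reducer_join key join_values → Spec_reducer_join key join_values (reducer_join key join_values)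

-- ===== LEMMAS AND PROOFS =====

-- ===== VERDICT (by name: the statement is the Claim_ definition above) =====
theorem foldl_state (l : List ((Int × Int × Int) × Int)) (tc tv g : Int) (sm : Bool) :
    l.foldl stepA (tc, tv, g, sm)
    = (tc + ((l.filter (fun jv => jv.2 == 1)).map (fun jv => jv.1.2.2)).sum,
       tv + ((l.filter (fun jv => jv.2 == 1)).map (fun jv => jv.1.1)).sum,
       g + ((l.filter (fun jv => jv.2 == 1)).map (fun jv => jv.1.2.1)).sum,
       sm || l.any (fun jv => jv.2 == 2)) := by
  induction l generalizing tc tv g sm with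
  | nil => simp
  | cons h t ih =>
    simp only [List.foldl_cons, List.filter_cons, List.any_cons]
    by_cases h1 : h.2 == 1 <;> by_cases h2 : h.2 == 2 <;>
      simp [stepA, h1, h2, ih, add_assoc]

theorem reducer_join_spec : Claim_equal_reducer_join := by
  intro key jv _
  unfold Spec_reducer_join reducer_join reducer_join_alt
  rw [foldl_state]
  simp only [Int.zero_add, Bool.false_or]
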